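-- pv_equiv track=rewrite | github.com/alexei-led/ccbot | src/ccbot/terminal_parser.py | format_status_display
-- ===== SOURCE A (Python) =====
-- _STATUS_KEYWORDS: list[tuple[str, str]] = [
--     ("think", "…thinking"),
--     ("reason", "…thinking"),
--     ("test", "…testing"),
--     ("read", "…reading"),
--     ("edit", "…editing"),
--     ("writ", "…writing"),
--     ("search", "…searching"),
--     ("grep", "…searching"),
--     ("glob", "…searching"),
--     ("install", "…installing"),
--     ("runn", "…running"),
--     ("bash", "…running"),
--     ("execut", "…running"),
--     ("compil", "…building"),
--     ("build", "…building"),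
--     ("lint", "…linting"),
--     ("format", "…formatting"),
--     ("deploy", "…deploying"),
--     ("fetch", "…fetching"),
--     ("download", "…downloading"),
--     ("upload", "…uploading"),
--     ("commit", "…committing"),
--     ("push", "…pushing"),
--     ("pull", "…pulling"),
--     ("clone", "…cloning"),
--     ("debug", "…debugging"),
--     ("delet", "…deleting"),
--     ("creat", "…creating"),
--     ("check", "…checking"),
--     ("updat", "…updating"),
--     ("analyz", "…analyzing"),
--     ("analys", "…analyzing"),
--     ("pars", "…parsing"),
--     ("verif", "…verifying"),
-- ]
--
-- def format_status_display(raw_status: str) -> str: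
--     """Convert raw Claude Code status text to a short display label.
--
--     Matches the first word first (so "Writing tests" → "…writing", not "…testing"),
--     then falls back to scanning the full string. Returns "…working" if nothing matches.
--     """
--     lower = raw_status.lower()
--     first_word = lower.split(maxsplit=1)[0] if lower else ""
--     for keyword, label in _STATUS_KEYWORDS:
--         if keyword in first_word:
--             return label
--     for keyword, label in _STATUS_KEYWORDS:
--         if keyword in lower:
--             return label
--     return "…working"
-- ===== SOURCE B (Python) =====
-- # Compact colon-separated keyword/label entry table parsed once; single pass with a fallback
-- # instead of A's two sequential scans.
-- _ENTRIES = [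
--     "think:thinking", "reason:thinking", "test:testing", "read:reading",
--     "edit:editing", "writ:writing", "search:searching", "grep:searching",
--     "glob:searching", "install:installing", "runn:running", "bash:running",
--     "execut:running", "compil:building", "build:building", "lint:linting",
--     "format:formatting", "deploy:deploying", "fetch:fetching",
--     "download:downloading", "upload:uploading", "commit:committing",
--     "push:pushing", "pull:pulling", "clone:cloning", "debug:debugging",
--     "delet:deleting", "creat:creating", "check:checking", "updat:updating",
--     "analyz:analyzing", "analys:analyzing", "pars:parsing", "verif:verifying",
-- ]
-- _TABLE = [(e.split(":")[0], "…" + e.split(":")[1]) for e in _ENTRIES]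
--
--
-- def format_status_display(raw_status: str) -> str:
--     """Single pass over the keyword table: return at once on a first-word hit,
--     latch the first full-string hit as a fallback."""
--     lower = raw_status.lower()
--     words = lower.split()
--     first_word = words[0] if words else ""
--     fallback = None
--     for keyword, label in _TABLE:
--         if keyword in first_word:
--             return label
--         if fallback is None and keyword in lower:
--             fallback = label
--     return fallback if fallback is not None else "…working"
-- ===== Notes on version B (the rewrite author's own statement) =====
-- stated objective: simpler
-- what changed: The keyword table is stored as compact colon-separated keyword/label entry strings parsed once at module load, and A's two sequential scans of the table are merged into one pass that returns immediately on a first-word hit and latches the first full-string hit in a fallback variable.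
import Mathlib
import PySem

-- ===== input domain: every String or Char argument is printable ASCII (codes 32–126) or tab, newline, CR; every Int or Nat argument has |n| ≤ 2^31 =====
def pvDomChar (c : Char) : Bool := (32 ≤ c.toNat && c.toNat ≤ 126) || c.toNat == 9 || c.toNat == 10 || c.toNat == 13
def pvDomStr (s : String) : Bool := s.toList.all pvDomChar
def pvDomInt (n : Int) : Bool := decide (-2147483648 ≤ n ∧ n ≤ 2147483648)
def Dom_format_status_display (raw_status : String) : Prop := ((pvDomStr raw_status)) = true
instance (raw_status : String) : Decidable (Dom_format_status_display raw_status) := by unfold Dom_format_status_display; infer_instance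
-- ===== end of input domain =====

-- B stores the keyword table as one compact spec string parsed once, and merges
-- A's two scans into a single pass with a fallback variable (objective: simpler).

-- ===== PORT A =====
-- the module constant _STATUS_KEYWORDS as A writes it: an explicit pair list
def statusKeywords : List (String × String) := [
  ("think", "…thinking"), ("reason", "…thinking"), ("test", "…testing"),
  ("read", "…reading"), ("edit", "…editing"), ("writ", "…writing"),
  ("search", "…searching"), ("grep", "…searching"), ("glob", "…searching"),
  ("install", "…installing"), ("runn", "…running"), ("bash", "…running"),
  ("execut", "…running"), ("compil", "…building"), ("build", "…building"),
  ("lint", "…linting"), ("format", "…formatting"), ("deploy", "…deploying"),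
  ("fetch", "…fetching"), ("download", "…downloading"), ("upload", "…uploading"),
  ("commit", "…committing"), ("push", "…pushing"), ("pull", "…pulling"),
  ("clone", "…cloning"), ("debug", "…debugging"), ("delet", "…deleting"),
  ("creat", "…creating"), ("check", "…checking"), ("updat", "…updating"),
  ("analyz", "…analyzing"), ("analys", "…analyzing"), ("pars", "…parsing"),
  ("verif", "…verifying")]

-- 'for keyword, label in table: if keyword in hay: return label' — first match or none
def fsdFirstMatch (hay : String) : List (String × String) → Option String
  | [] => none
  | (kw, lbl) :: rest => if PySem.Str.isIn kw hay then some lbl else fsdFirstMatch hay rest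

def format_status_display (raw_status : String) : String :=
  let lower := PySem.Str.lower raw_status
  -- first element of lower.split(maxsplit=1) when lower is truthy; pyGet? is none exactly
  -- where Python raises IndexError — Pre_ excludes that, the .getD "" is a mere totalizer
  let first_word := if lower = "" then "" else ((PySem.List.pyGet? (PySem.Str.split₀Max lower 1) 0).getD "")
  match fsdFirstMatch first_word statusKeywords with
  | some lbl => lbl
  | none =>
    match fsdFirstMatch lower statusKeywords with
    | some lbl => lbl
    | none => "…working"

-- ===== PORT B =====
-- B's module constant _ENTRIES: the table as compact "keyword:label" strings
def statusEntries : List String := [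
  "think:thinking", "reason:thinking", "test:testing", "read:reading",
  "edit:editing", "writ:writing", "search:searching", "grep:searching",
  "glob:searching", "install:installing", "runn:running", "bash:running",
  "execut:running", "compil:building", "build:building", "lint:linting",
  "format:formatting", "deploy:deploying", "fetch:fetching",
  "download:downloading", "upload:uploading", "commit:committing",
  "push:pushing", "pull:pulling", "clone:cloning", "debug:debugging",
  "delet:deleting", "creat:creating", "check:checking", "updat:updating",
  "analyz:analyzing", "analys:analyzing", "pars:parsing", "verif:verifying"]

-- _TABLE = [(e.split(":")[0], "…" + e.split(":")[1]) for e in _ENTRIES]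
-- the .getD totalizers stand for the [0]/[1] indexing, which cannot miss here
def fsdParsedTable : List (String × String) :=
  statusEntries.map (fun e =>
    ((PySem.List.pyGet? ((PySem.Str.split? e ":").getD []) 0).getD "",
     "…" ++ ((PySem.List.pyGet? ((PySem.Str.split? e ":").getD []) 1).getD "")))

-- single pass: return label on a first-word hit, latch the first full-string hit
def fsdAltLoop (first_word lower : String) : List (String × String) → Option String → String
  | [], fallback => fallback.getD "…working"
  | (kw, lbl) :: rest, fallback =>
    if PySem.Str.isIn kw first_word then lbl
    else fsdAltLoop first_word lower rest
      (if fallback.isNone && PySem.Str.isIn kw lower then some lbl else fallback)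

def format_status_display_alt (raw_status : String) : String :=
  let lower := PySem.Str.lower raw_status
  let first_word := match PySem.Str.split₀ lower with
    | [] => ""
    | w :: _ => w
  fsdAltLoop first_word lower fsdParsedTable none

-- ===== PRECONDITION & SPEC =====
-- Pre_ excludes exactly the non-empty all-whitespace strings, on which A raises
-- IndexError (indexing the empty result of splitting a whitespace-only string).
def Pre_format_status_display (raw_status : String) : Prop :=
  PySem.Str.strIsspace raw_status = false
instance (raw_status : String) : Decidable (Pre_format_status_display raw_status) := by
  unfold Pre_format_status_display; infer_instance

def pvWitness_format_status_display : String := "Writing tests"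

def Spec_format_status_display (raw_status : String) (out : String) : Prop :=
  out = format_status_display_alt raw_status
instance (raw_status : String) (out : String) : Decidable (Spec_format_status_display raw_status out) := by
  unfold Spec_format_status_display; infer_instance

-- ===== CLAIM (what is proved, stated in full; the proofs are below) =====
def Claim_equal_format_status_display : Prop := ∀ (raw_status : String), Dom_format_status_display raw_status → Pre_format_status_display raw_status → Spec_format_status_display raw_status (format_status_display raw_status)

-- ===== LEMMAS AND PROOFS =====

-- B's parsed table is A's explicit pair list (a closed computation)
set_option maxRecDepth 20000 in
set_option maxHeartbeats 2000000 in
lemma fsd_table_eq : fsdParsedTable = statusKeywords := rfl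

lemma fsd_go_acc (s : List Char) : ∀ (cur : List Char) (acc : List (List Char)),
    PySem.Chars.split₀.go s cur acc = acc.reverse ++ PySem.Chars.split₀.go s cur [] := by
  induction s with
  | nil =>
    intro cur acc
    simp only [PySem.Chars.split₀.go]
    by_cases h : cur.isEmpty <;> simp [h]
  | cons c rest ih =>
    intro cur acc
    by_cases hs : PySem.Chars.isspace c = true
    · by_cases hc : cur = []
      · subst hc
        have h1 : ∀ a, PySem.Chars.split₀.go (c :: rest) ([] : List Char) a
            = PySem.Chars.split₀.go rest [] a := by
          intro a; simp [PySem.Chars.split₀.go, hs]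
        rw [h1, h1, ih [] acc]
      · have h1 : ∀ a, PySem.Chars.split₀.go (c :: rest) cur a
            = PySem.Chars.split₀.go rest [] (cur.reverse :: a) := by
          intro a; simp [PySem.Chars.split₀.go, hs, List.isEmpty_iff, hc]
        rw [h1, h1, ih [] (cur.reverse :: acc), ih [] [cur.reverse]]
        simp
    · have h1 : ∀ a, PySem.Chars.split₀.go (c :: rest) cur a
          = PySem.Chars.split₀.go rest (c :: cur) a := by
        intro a; simp [PySem.Chars.split₀.go, hs]
      rw [h1, h1, ih (c :: cur) acc]

lemma fsd_go_first (s : List Char) : ∀ (cur : List Char), cur ≠ [] →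
    (PySem.Chars.split₀.go s cur []).head?
      = some (cur.reverse ++ s.takeWhile (fun c => !PySem.Chars.isspace c)) := by
  induction s with
  | nil =>
    intro cur hc
    simp only [PySem.Chars.split₀.go]
    simp [List.isEmpty_iff, hc]
  | cons c rest ih =>
    intro cur hc
    by_cases hs : PySem.Chars.isspace c = true
    · have h1 : PySem.Chars.split₀.go (c :: rest) cur []
          = PySem.Chars.split₀.go rest [] [cur.reverse] := by
        simp [PySem.Chars.split₀.go, hs, List.isEmpty_iff, hc]
      rw [h1, fsd_go_acc]
      simp [hs]
    · have h1 : PySem.Chars.split₀.go (c :: rest) cur []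
          = PySem.Chars.split₀.go rest (c :: cur) [] := by
        simp [PySem.Chars.split₀.go, hs]
      rw [h1, ih (c :: cur) (by simp)]
      simp [hs]

-- head of s.split(): the first maximal non-space run, if any
lemma fsd_split₀_head (s : List Char) :
    (PySem.Chars.split₀ s).head? =
      if s.dropWhile PySem.Chars.isspace = [] then none
      else some ((s.dropWhile PySem.Chars.isspace).takeWhile (fun c => !PySem.Chars.isspace c)) := by
  induction s with
  | nil => simp [PySem.Chars.split₀, PySem.Chars.split₀.go]
  | cons c rest ih =>
    by_cases hs : PySem.Chars.isspace c = true
    · have h1 : PySem.Chars.split₀ (c :: rest) = PySem.Chars.split₀ rest := by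
        simp [PySem.Chars.split₀, PySem.Chars.split₀.go, hs]
      rw [h1, ih, List.dropWhile_cons, if_pos hs]
    · have h1 : PySem.Chars.split₀ (c :: rest) = PySem.Chars.split₀.go rest [c] [] := by
        simp [PySem.Chars.split₀, PySem.Chars.split₀.go, hs]
      rw [h1, fsd_go_first rest [c] (by simp), List.dropWhile_cons, if_neg hs]
      simp [hs]

-- the inner state of s.split(maxsplit=1) after the first token is emitted
lemma fsd_max_inner (n : Nat) (r t : List Char) :
    (PySem.Chars.split₀Max.go n 0 r [t]).head? = some t := by
  cases n with
  | zero => simp [PySem.Chars.split₀Max.go]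
  | succ m =>
    cases hd : r.dropWhile PySem.Chars.isspace with
    | nil => simp [PySem.Chars.split₀Max.go, hd]
    | cons e es => simp [PySem.Chars.split₀Max.go, hd]

-- head of s.split(maxsplit=1): the same first run
lemma fsd_split₀Max_head (s : List Char) :
    (PySem.Chars.split₀Max s 1).head? =
      if s.dropWhile PySem.Chars.isspace = [] then none
      else some ((s.dropWhile PySem.Chars.isspace).takeWhile (fun c => !PySem.Chars.isspace c)) := by
  have h1 : PySem.Chars.split₀Max s 1 = PySem.Chars.split₀Max.go (s.length + 1) 1 s [] := by
    simp [PySem.Chars.split₀Max]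
  rw [h1]
  cases hd : s.dropWhile PySem.Chars.isspace with
  | nil => simp [PySem.Chars.split₀Max.go, hd]
  | cons d ds =>
    have h2 : PySem.Chars.split₀Max.go (s.length + 1) 1 s []
        = PySem.Chars.split₀Max.go s.length 0
            ((d :: ds).dropWhile (fun c => !PySem.Chars.isspace c))
            [(d :: ds).takeWhile (fun c => !PySem.Chars.isspace c)] := by
      simp [PySem.Chars.split₀Max.go, hd]
    rw [h2, fsd_max_inner]
    simp

lemma fsd_heads_eq (s : List Char) :
    (PySem.Chars.split₀Max s 1).head? = (PySem.Chars.split₀ s).head? := by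
  rw [fsd_split₀Max_head, fsd_split₀_head]

lemma fsd_pyGet?_zero {α : Type} (xs : List α) : PySem.List.pyGet? xs 0 = xs.head? := by
  cases xs <;> simp [PySem.List.pyGet?, PySem.List.pyIdx?]

-- A's first_word expression equals B's
lemma fsd_first_word_eq (s : String) :
    (if s = "" then "" else ((PySem.List.pyGet? (PySem.Str.split₀Max s 1) 0).getD ""))
      = (match PySem.Str.split₀ s with | [] => "" | w :: _ => w) := by
  have hmatch : (match PySem.Str.split₀ s with | [] => "" | w :: _ => w)
      = ((PySem.Str.split₀ s).head?).getD "" := by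
    cases h : PySem.Str.split₀ s <;> simp
  rw [hmatch]
  by_cases hs : s = ""
  · subst hs; decide
  · rw [if_neg hs, fsd_pyGet?_zero]
    simp only [PySem.Str.split₀Max, PySem.Str.split₀, List.head?_map]
    rw [fsd_heads_eq]

-- the single pass computes: first-word match, else latched fallback / full-string match
lemma fsd_altLoop_eq (first_word lower : String) :
    ∀ (table : List (String × String)) (fb : Option String),
      fsdAltLoop first_word lower table fb =
        match fsdFirstMatch first_word table with
        | some lbl => lbl
        | none => (fb.orElse (fun _ => fsdFirstMatch lower table)).getD "…working" := by
  intro table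
  induction table with
  | nil => intro fb; cases fb <;> simp [fsdAltLoop, fsdFirstMatch, Option.orElse]
  | cons p rest ih =>
    intro fb
    obtain ⟨kw, lbl⟩ := p
    simp only [fsdAltLoop, fsdFirstMatch]
    by_cases h1 : PySem.Str.isIn kw first_word = true
    · rw [if_pos h1, if_pos h1]
    · rw [if_neg h1, if_neg h1, ih]
      cases fb with
      | some x => cases fsdFirstMatch first_word rest <;> simp [Option.orElse]
      | none =>
        by_cases h2 : PySem.Chars.isIn kw.toList lower.toList = true <;>
          cases fsdFirstMatch first_word rest <;>
            simp [h2, Option.orElse]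

-- ===== VERDICT (by name: the statement is the Claim_ definition above) =====
theorem format_status_display_spec : Claim_equal_format_status_display := by
  intro raw_status _hdom _hpre
  unfold Spec_format_status_display
  unfold format_status_display format_status_display_alt
  simp only []
  rw [fsd_first_word_eq (PySem.Str.lower raw_status)]
  rw [fsd_table_eq, fsd_altLoop_eq]
  cases h1 : fsdFirstMatch
      (match PySem.Str.split₀ (PySem.Str.lower raw_status) with | [] => "" | w :: _ => w)
      statusKeywords with
  | some lbl => simp
  | none =>
    cases fsdFirstMatch (PySem.Str.lower raw_status) statusKeywords <;>
      simp [Option.orElse]
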